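-- pv_equiv track=rewrite | github.com/mmk150/AdventOfCode | AoC 2022/puzzle25a.py | convert_to_quinary
-- ===== SOURCE A (Python) =====
-- def convert_to_quinary(decimal_number):
--     remainder_stack = []
--
--     while decimal_number > 0:
--         remainder = decimal_number % 5
--         remainder_stack.append(remainder)
--         decimal_number = decimal_number // 5
--
--     digits = []
--     while remainder_stack:
--         digits.append(str(remainder_stack.pop()))
--
--     return "".join(digits)
-- ===== SOURCE B (Python) =====
-- def convert_to_quinary(decimal_number):
--     if decimal_number <= 0:
--         return ""
--     return convert_to_quinary(decimal_number // 5) + str(decimal_number % 5)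
-- ===== Notes on version B (the rewrite author's own statement) =====
-- stated objective: simpler
-- what changed: Replaces A's two explicit loops and the intermediate remainder stack with a three-line recursion whose call stack performs the digit reversal.
import Mathlib
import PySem

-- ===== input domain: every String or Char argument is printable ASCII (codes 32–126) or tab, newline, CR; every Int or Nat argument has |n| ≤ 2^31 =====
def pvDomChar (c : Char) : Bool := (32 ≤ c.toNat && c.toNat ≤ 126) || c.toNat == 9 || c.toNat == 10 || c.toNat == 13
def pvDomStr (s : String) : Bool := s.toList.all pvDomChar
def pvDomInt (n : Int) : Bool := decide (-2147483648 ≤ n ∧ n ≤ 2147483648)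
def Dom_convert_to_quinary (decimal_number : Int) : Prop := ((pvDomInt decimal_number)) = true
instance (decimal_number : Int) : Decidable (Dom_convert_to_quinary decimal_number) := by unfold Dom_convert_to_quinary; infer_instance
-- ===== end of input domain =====

-- B replaces A's two explicit loops and remainder stack by a direct recursion (simpler decomposition).


-- termination helper used by both ports
theorem pv_div5_toNat_lt (n : Int) (h : 0 < n) :
    (PySem.Int.floordiv n 5).toNat < n.toNat := by
  rw [PySem.Int.floordiv_eq_ediv_of_pos (by norm_num)]
  omega

-- ===== PORT A =====
-- first while loop: push remainders onto the stack
def pvStack (decimal_number : Int) (remainder_stack : List Int) : List Int :=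
  if h : decimal_number > 0 then
    pvStack (PySem.Int.floordiv decimal_number 5)
      (remainder_stack ++ [PySem.Int.mod decimal_number 5])
  else remainder_stack
termination_by decimal_number.toNat
decreasing_by exact pv_div5_toNat_lt _ h

-- second while loop: pop the stack, collecting digit strings
def pvDigits (remainder_stack : List Int) (digits : List String) : List String :=
  if h : remainder_stack = [] then digits
  else pvDigits remainder_stack.dropLast (digits ++ [PySem.Int.toStr remainder_stack.getLast!])
termination_by remainder_stack.length
decreasing_by
  rw [List.length_dropLast]; have := List.length_pos_iff.mpr h; omega

def convert_to_quinary (decimal_number : Int) : String :=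
  PySem.Str.join "" (pvDigits (pvStack decimal_number []) [])

-- ===== PORT B =====
def convert_to_quinary_alt (decimal_number : Int) : String :=
  if h : decimal_number ≤ 0 then ""
  else convert_to_quinary_alt (PySem.Int.floordiv decimal_number 5)
        ++ PySem.Int.toStr (PySem.Int.mod decimal_number 5)
termination_by decimal_number.toNat
decreasing_by exact pv_div5_toNat_lt _ (by omega)

-- ===== PRECONDITION & SPEC =====
def Spec_convert_to_quinary (decimal_number : Int) (out : String) : Prop := out = convert_to_quinary_alt decimal_number
instance (decimal_number : Int) (out : String) : Decidable (Spec_convert_to_quinary decimal_number out) := by unfold Spec_convert_to_quinary; infer_instance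

-- ===== CLAIM (what is proved, stated in full; the proofs are below) =====
def Claim_equal_convert_to_quinary : Prop := ∀ (decimal_number : Int), Dom_convert_to_quinary decimal_number → Spec_convert_to_quinary decimal_number (convert_to_quinary decimal_number)

-- ===== LEMMAS AND PROOFS =====

-- the stack loop distributes over its accumulator
theorem pvStack_acc (n : Int) : ∀ s : List Int, pvStack n s = s ++ pvStack n [] := by
  induction n using (fun motive ih n => Nat.strongRecOn (motive := fun k => ∀ m : Int, m.toNat = k → motive m) n.toNat (fun k ih' m hm => ih m (fun m' hm' => ih' m'.toNat (hm ▸ hm') m' rfl)) n rfl :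
      ∀ motive : Int → Prop, (∀ n : Int, (∀ m : Int, m.toNat < n.toNat → motive m) → motive n) → ∀ n : Int, motive n) with
  | _ n ih =>
    intro s
    conv_lhs => rw [pvStack]
    conv_rhs => rw [pvStack]
    by_cases h : n > 0
    · rw [dif_pos h, dif_pos h,
        ih _ (pv_div5_toNat_lt _ h) (s ++ [PySem.Int.mod n 5]),
        ih _ (pv_div5_toNat_lt _ h) ([] ++ [PySem.Int.mod n 5])]
      simp
    · rw [dif_neg h, dif_neg h]; simp

-- the pop loop produces the reversed stack as digit strings
theorem pvDigits_eq (s : List Int) : ∀ d : List String,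
    pvDigits s d = d ++ (s.reverse.map PySem.Int.toStr) := by
  induction s using List.reverseRecOn with
  | nil => intro d; rw [pvDigits]; simp
  | append_singleton s a ih =>
    intro d
    rw [pvDigits, dif_neg (by simp)]
    simp [ih]

theorem pv_chars_join_append (l₁ l₂ : List (List Char)) :
    PySem.Chars.join [] (l₁ ++ l₂) = PySem.Chars.join [] l₁ ++ PySem.Chars.join [] l₂ := by
  induction l₁ with
  | nil => simp [PySem.Chars.join_nil]
  | cons x l ih =>
    cases l with
    | nil =>
      cases l₂ with
      | nil => simp [PySem.Chars.join_nil, PySem.Chars.join_singleton]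
      | cons y t => simp [PySem.Chars.join_cons_cons, PySem.Chars.join_singleton]
    | cons y t =>
      simp only [List.cons_append, PySem.Chars.join_cons_cons] at *
      simp [ih]

theorem pv_join_empty_append (l₁ l₂ : List String) :
    PySem.Str.join "" (l₁ ++ l₂) = PySem.Str.join "" l₁ ++ PySem.Str.join "" l₂ := by
  apply String.toList_inj.mp
  simp [PySem.Str.toList_join, pv_chars_join_append]

theorem pv_join_empty_singleton (s : String) : PySem.Str.join "" [s] = s := by
  apply String.toList_inj.mp
  simp [PySem.Str.toList_join, PySem.Chars.join_singleton]

theorem pv_join_empty_nil : PySem.Str.join "" ([] : List String) = "" := by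
  apply String.toList_inj.mp
  simp [PySem.Str.toList_join, PySem.Chars.join_nil]

theorem pv_main (n : Int) : convert_to_quinary n = convert_to_quinary_alt n := by
  induction n using (fun motive ih n => Nat.strongRecOn (motive := fun k => ∀ m : Int, m.toNat = k → motive m) n.toNat (fun k ih' m hm => ih m (fun m' hm' => ih' m'.toNat (hm ▸ hm') m' rfl)) n rfl :
      ∀ motive : Int → Prop, (∀ n : Int, (∀ m : Int, m.toNat < n.toNat → motive m) → motive n) → ∀ n : Int, motive n) with
  | _ n ih =>
    by_cases h : n > 0
    · have ih' := ih _ (pv_div5_toNat_lt _ h)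
      unfold convert_to_quinary at *
      rw [pvStack, dif_pos h, pvStack_acc, List.nil_append, pvDigits_eq]
      rw [convert_to_quinary_alt, dif_neg (by omega), ← ih']
      simp only [List.reverse_append, List.reverse_singleton, List.map_append,
        List.map_cons, List.map_nil]
      rw [pvDigits_eq, List.nil_append, pv_join_empty_append, pv_join_empty_singleton,
        List.nil_append]
    · unfold convert_to_quinary
      rw [pvStack, dif_neg h, pvDigits, dif_pos rfl,
        convert_to_quinary_alt, dif_pos (by omega)]
      exact pv_join_empty_nil

-- ===== VERDICT (by name: the statement is the Claim_ definition above) =====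
theorem convert_to_quinary_spec : Claim_equal_convert_to_quinary := by
  intro n _
  unfold Spec_convert_to_quinary
  exact pv_main n
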